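-- pv_equiv track=rewrite | github.com/justNeto/dotfiles | .local/bin/py-scripts/netpy-utils.py | mask_to_bin
-- ===== SOURCE A (Python) =====
-- def string_to_decimal_to_bin(string_aux):
--     aux = ""
--     num = int(string_aux)
--     num = bin(num).replace("0b", "")
--
--     if len(num) != 8:
--         while (len(aux) + len(num)) != 8:
--             aux += "0"
--
--     return aux + num
--
-- def mask_to_bin(mask):
--     converted_nuger = ""
--     aux = ""
--
--     for i in range(len(mask)):
--
--         if mask[i] == ".": # make conversion
--             converted_nuger += str(string_to_decimal_to_bin(aux)) + "."
--             aux = ""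
--
--         else:
--             aux += mask[i]
--
--     return (converted_nuger)
-- ===== SOURCE B (Python) =====
-- def mask_to_bin(mask):
--     out = []
--     for p in mask.split('.')[:-1]:
--         num = bin(int(p)).replace('0b', '')
--         out.append('0' * (8 - len(num)) + num + '.')
--     return ''.join(out)
-- ===== Notes on version B (the rewrite author's own statement) =====
-- stated objective: faster
-- what changed: B tokenizes the mask with str.split and converts each octet independently, padding with string multiplication and assembling the result with str.join, instead of A's per-character index loop that accumulates an octet string, flushes it at each separator, and pads by appending one zero per iteration.
import Mathlib
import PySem

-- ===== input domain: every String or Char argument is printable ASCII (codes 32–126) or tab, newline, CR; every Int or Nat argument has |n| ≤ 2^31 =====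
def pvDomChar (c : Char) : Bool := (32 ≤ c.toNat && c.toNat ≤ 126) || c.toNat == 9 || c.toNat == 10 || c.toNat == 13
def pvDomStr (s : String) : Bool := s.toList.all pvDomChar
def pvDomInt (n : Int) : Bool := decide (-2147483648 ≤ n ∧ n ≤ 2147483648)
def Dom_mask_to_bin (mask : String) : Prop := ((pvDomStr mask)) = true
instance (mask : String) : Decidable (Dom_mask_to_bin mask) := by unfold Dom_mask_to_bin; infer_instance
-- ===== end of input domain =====

-- B tokenizes with str.split and joins per-octet conversions instead of A's per-character scan with repeated string concatenation (measured faster in a timing run).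

-- ===== PORT A =====
-- the padding loop of string_to_decimal_to_bin; each iteration adds one zero character, so when it
-- terminates in Python (len(num) ≤ 8, guaranteed inside Pre_) it runs at most 8 iterations: fuel 8 is exact there.
def pvPad : Nat → List Char → List Char → List Char
  | 0, aux, _ => aux
  | f + 1, aux, num => if aux.length + num.length = 8 then aux else pvPad f (aux ++ ['0']) num

-- string_to_decimal_to_bin; none = ValueError from int(string_aux)
def pvS2B (string_aux : List Char) : Option (List Char) :=
  (PySem.Int.ofChars? string_aux).map (fun n =>
    let num := PySem.Chars.replace (PySem.Int.toBinChars0b n) ['0', 'b'] []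
    let aux := if num.length ≠ 8 then pvPad 8 [] num else ([] : List Char)
    aux ++ num)

-- the 'for i in range(len(mask))' loop, state = (converted_nuger, aux)
def pvLoopA : List Char → List Char → List Char → Option (List Char)
  | [], conv, _ => some conv
  | ch :: rest, conv, aux =>
    if ch = '.' then
      match pvS2B aux with
      | some b => pvLoopA rest (conv ++ b ++ ['.']) []
      | none => none
    else pvLoopA rest conv (aux ++ [ch])

def mask_to_bin (mask : String) : String :=
  String.ofList ((pvLoopA mask.toList [] []).getD [])

-- ===== PORT B =====
-- one octet of Source B's loop body: bin(int(p)).replace('0b','') zero-padded to 8 plus the dot; none = ValueError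
def pvOctet (p : List Char) : Option (List Char) :=
  (PySem.Int.ofChars? p).map (fun n =>
    let num := PySem.Chars.replace (PySem.Int.toBinChars0b n) ['0', 'b'] []
    List.replicate (8 - num.length) '0' ++ num ++ ['.'])

def mask_to_bin_alt (mask : String) : String :=
  String.ofList
    (((((PySem.Chars.splitOn mask.toList ['.']).dropLast).mapM pvOctet).map List.flatten).getD [])

-- ===== PRECONDITION & SPEC =====
-- Pre_ = exactly the inputs on which A returns: every dot-terminated field of the mask must parse as a
-- Python int (else int() raises ValueError) with -128 < n ≤ 255 (else bin(n) has more than 8 characters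
-- and A's zero-padding loop never terminates).
def Pre_mask_to_bin (mask : String) : Prop :=
  ∀ p ∈ (PySem.Chars.splitOn mask.toList ['.']).dropLast,
    ((PySem.Int.ofChars? p).any fun n => decide (-128 < n ∧ n ≤ 255)) = true
instance (mask : String) : Decidable (Pre_mask_to_bin mask) := by unfold Pre_mask_to_bin; infer_instance

def pvWitness_mask_to_bin : String := "255.255.0.1."

def Spec_mask_to_bin (mask : String) (out : String) : Prop := out = mask_to_bin_alt mask
instance (mask : String) (out : String) : Decidable (Spec_mask_to_bin mask out) := by unfold Spec_mask_to_bin; infer_instance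

-- ===== CLAIM (what is proved, stated in full; the proofs are below) =====
def Claim_equal_mask_to_bin : Prop := ∀ (mask : String), Dom_mask_to_bin mask → Pre_mask_to_bin mask → Spec_mask_to_bin mask (mask_to_bin mask)

-- ===== LEMMAS AND PROOFS =====

-- proof-side splitter: pvSplit c cs aux = the fields of aux ++ cs, split at c
def pvSplit (c : Char) : List Char → List Char → List (List Char)
  | [], aux => [aux]
  | x :: rest, aux => if x = c then aux :: pvSplit c rest [] else pvSplit c rest (aux ++ [x])

theorem pvSplit_ne_nil (c : Char) (l aux : List Char) : pvSplit c l aux ≠ [] := by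
  induction l generalizing aux with
  | nil => simp [pvSplit]
  | cons x rest ih =>
    by_cases hx : x = c
    · simp only [pvSplit, if_pos hx]; simp
    · simp only [pvSplit, if_neg hx]; exact ih _

theorem splitOn_go_eq (c : Char) : ∀ (fuel : Nat) (l cur : List Char) (acc : List (List Char)),
    l.length < fuel →
    PySem.Chars.splitOn.go [c] fuel l cur acc = acc.reverse ++ pvSplit c l cur.reverse := by
  intro fuel
  induction fuel with
  | zero => intro l cur acc h; omega
  | succ f ih =>
    intro l cur acc h
    cases l with
    | nil => simp [PySem.Chars.splitOn.go, pvSplit]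
    | cons x rest =>
      by_cases hx : x = c
      · subst hx
        have hp : [x].isPrefixOf (x :: rest) = true := by simp [List.isPrefixOf]
        rw [PySem.Chars.splitOn.go]
        simp only [hp, if_pos]
        rw [ih _ [] _ (by simpa using Nat.lt_of_succ_lt_succ h)]
        simp [pvSplit]
      · have hp : [c].isPrefixOf (x :: rest) = false := by
          simp [List.isPrefixOf]; exact fun hh => absurd hh.symm hx
        rw [PySem.Chars.splitOn.go]
        simp only [hp, Bool.false_eq_true, if_false]
        rw [ih _ (x :: cur) _ (by simpa using Nat.lt_of_succ_lt_succ h)]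
        simp [pvSplit, hx]

theorem splitOn_eq_pvSplit (c : Char) (cs : List Char) :
    PySem.Chars.splitOn cs [c] = pvSplit c cs [] := by
  rw [PySem.Chars.splitOn, splitOn_go_eq c (cs.length + 1) cs [] [] (by omega)]; simp

-- per-octet: A's incremental padding equals B's replicate padding, for every value bin() keeps ≤ 8 chars
set_option maxHeartbeats 1000000 in
theorem pvPart_eq (n : Int) (h1 : -128 < n) (h2 : n ≤ 255) :
    (let num := PySem.Chars.replace (PySem.Int.toBinChars0b n) ['0', 'b'] [];
     (if num.length ≠ 8 then pvPad 8 [] num else ([] : List Char)) ++ num) =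
    (let num := PySem.Chars.replace (PySem.Int.toBinChars0b n) ['0', 'b'] [];
     List.replicate (8 - num.length) '0' ++ num) := by
  interval_cases n <;> decide

theorem pvS2B_octet (p : List Char)
    (h : ((PySem.Int.ofChars? p).any fun n => decide (-128 < n ∧ n ≤ 255)) = true) :
    ∃ b, pvS2B p = some b ∧ pvOctet p = some (b ++ ['.']) := by
  cases hp : PySem.Int.ofChars? p with
  | none => rw [hp] at h; simp [Option.any] at h
  | some n =>
    rw [hp] at h
    simp only [Option.any, decide_eq_true_eq] at h
    refine ⟨(if (PySem.Chars.replace (PySem.Int.toBinChars0b n) ['0', 'b'] []).length ≠ 8 then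
        pvPad 8 [] (PySem.Chars.replace (PySem.Int.toBinChars0b n) ['0', 'b'] []) else ([] : List Char)) ++
        PySem.Chars.replace (PySem.Int.toBinChars0b n) ['0', 'b'] [], ?_, ?_⟩
    · simp [pvS2B, hp]
    · simp only [pvOctet, hp, Option.map_some, Option.some.injEq]
      have := (pvPart_eq n h.1 h.2).symm
      simp only at this
      rw [this]

theorem pvLoopA_eq (cs : List Char) : ∀ (conv aux : List Char),
    (∀ p ∈ (pvSplit '.' cs aux).dropLast,
        ((PySem.Int.ofChars? p).any fun n => decide (-128 < n ∧ n ≤ 255)) = true) →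
    pvLoopA cs conv aux =
      (((pvSplit '.' cs aux).dropLast.mapM pvOctet).map fun ls => conv ++ ls.flatten) := by
  induction cs with
  | nil => intro conv aux _; simp [pvLoopA, pvSplit]
  | cons ch rest ih =>
    intro conv aux H
    by_cases hch : ch = '.'
    · subst hch
      have hsplit : pvSplit '.' ('.' :: rest) aux = aux :: pvSplit '.' rest [] := by
        simp [pvSplit]
      rw [hsplit] at H
      rw [List.dropLast_cons_of_ne_nil (pvSplit_ne_nil _ _ _)] at H
      obtain ⟨b, hb, ho⟩ := pvS2B_octet aux (H aux (by simp))
      have H' : ∀ p ∈ (pvSplit '.' rest []).dropLast,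
          ((PySem.Int.ofChars? p).any fun n => decide (-128 < n ∧ n ≤ 255)) = true :=
        fun p hp => H p (by simp [hp])
      simp only [pvLoopA, hb]
      simp only [if_true]
      rw [ih (conv ++ b ++ ['.']) [] H', hsplit,
        List.dropLast_cons_of_ne_nil (pvSplit_ne_nil _ _ _), List.mapM_cons, ho]
      cases hm : (pvSplit '.' rest []).dropLast.mapM pvOctet with
      | none => simp
      | some ls => simp [List.flatten_cons, List.append_assoc]
    · have hsplit : pvSplit '.' (ch :: rest) aux = pvSplit '.' rest (aux ++ [ch]) := by
        simp [pvSplit, hch]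
      rw [hsplit] at H
      simp only [pvLoopA, if_neg hch]
      rw [ih conv (aux ++ [ch]) H, hsplit]

-- ===== VERDICT (by name: the statement is the Claim_ definition above) =====
theorem mask_to_bin_spec : Claim_equal_mask_to_bin := by
  intro mask _dom hpre
  unfold Spec_mask_to_bin mask_to_bin mask_to_bin_alt
  unfold Pre_mask_to_bin at hpre
  rw [splitOn_eq_pvSplit] at hpre ⊢
  rw [pvLoopA_eq mask.toList [] [] hpre]
  cases (pvSplit '.' mask.toList []).dropLast.mapM pvOctet <;> simp
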